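-- pv_equiv track=rewrite | github.com/wangzizhe/GateForge | gateforge/agent_modelica_evidence_stress_injector_v1.py | _task_indices_round_robin
-- ===== SOURCE A (Python) =====
-- def _task_indices_round_robin(tasks: list[dict], limit: int, excluded: set[int]) -> list[int]:
--     if limit <= 0:
--         return []
--     buckets: dict[tuple[str, str], list[int]] = {}
--     for idx, task in enumerate(tasks):
--         if idx in excluded:
--             continue
--         scale = str(task.get("scale") or "unknown")
--         ftype = str(task.get("failure_type") or "unknown")
--         buckets.setdefault((scale, ftype), []).append(idx)
--     picked: list[int] = []
--     while len(picked) < limit: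
--         progress = False
--         for key in sorted(buckets.keys()):
--             rows = buckets.get(key) or []
--             if not rows:
--                 continue
--             picked.append(rows.pop(0))
--             progress = True
--             if len(picked) >= limit:
--                 break
--         if not progress:
--             break
--     return picked
-- ===== SOURCE B (Python) =====
-- def _task_indices_round_robin(tasks: list[dict], limit: int, excluded: set[int]) -> list[int]:
--     if limit <= 0:
--         return []
--     buckets: dict[tuple[str, str], list[int]] = {}
--     for idx, task in enumerate(tasks):
--         if idx in excluded:
--             continue
--         scale = str(task.get("scale") or "unknown")
--         ftype = str(task.get("failure_type") or "unknown")
--         buckets.setdefault((scale, ftype), []).append(idx)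
--     entries = [(pos, key, idx)
--                for key, rows in buckets.items()
--                for pos, idx in enumerate(rows)]
--     entries.sort(key=lambda e: (e[0], e[1]))
--     return [idx for _, _, idx in entries[:limit]]
-- ===== Notes on version B (the rewrite author's own statement) =====
-- stated objective: alternative
-- what changed: The destructive round-by-round loop (pop(0) from each bucket, progress flag, early break) is replaced by building a flat (round, key, index) table once and stably sorting it by (round, key), then slicing off the first `limit` indices.
import Mathlib
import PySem

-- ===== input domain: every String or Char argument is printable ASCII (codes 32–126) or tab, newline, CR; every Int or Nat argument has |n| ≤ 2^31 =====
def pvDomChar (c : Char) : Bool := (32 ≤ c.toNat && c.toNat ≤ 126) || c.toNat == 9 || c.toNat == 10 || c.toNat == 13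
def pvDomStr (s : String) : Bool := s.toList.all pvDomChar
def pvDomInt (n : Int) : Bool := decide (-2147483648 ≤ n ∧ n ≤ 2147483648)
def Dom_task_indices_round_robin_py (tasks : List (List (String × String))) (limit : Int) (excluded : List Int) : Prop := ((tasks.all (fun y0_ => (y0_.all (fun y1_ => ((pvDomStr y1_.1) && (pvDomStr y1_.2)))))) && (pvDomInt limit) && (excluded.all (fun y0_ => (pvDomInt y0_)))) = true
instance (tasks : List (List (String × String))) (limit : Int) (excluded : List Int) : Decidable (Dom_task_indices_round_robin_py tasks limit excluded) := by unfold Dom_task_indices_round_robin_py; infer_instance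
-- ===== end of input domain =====

-- B replaces A's destructive round-by-round popping loop by building a flat (round, key, index)
-- table once and stably sorting it by (round, key), then slicing; same return value, no speed claim.

-- ===== PORT A =====
-- str(task.get(f) or "unknown"): values are strings, so str(...) is the identity and '' is falsy.
def pvNorm (task : List (String × String)) (field : String) : String :=
  match PySem.Dict.get? ⟨task⟩ field with
  | some v => if v = "" then "unknown" else v
  | none => "unknown"

-- the bucket-building loop, identical line for line in both Pythons (setdefault(..., []).append(idx))
def pvBuckets (tasks : List (List (String × String))) (excluded : List Int) :
    PySem.Dict (String × String) (List Int) :=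
  (PySem.List.enumerate tasks).foldl
    (fun b p =>
      if excluded.contains p.1 then b
      else PySem.Dict.modify b (pvNorm p.2 "scale", pvNorm p.2 "failure_type") [] (· ++ [p.1]))
    PySem.Dict.empty

-- sorted(buckets.keys()): Python's tuple comparison is lexicographic = '<' on Lex (String × String)
def pvSK (b : PySem.Dict (String × String) (List Int)) : List (String × String) :=
  PySem.List.sorted (PySem.Dict.keys b) (fun k => toLex k) false

-- the inner 'for key in sorted(buckets.keys())' loop with its early break;
-- rows.pop(0) mutates the list held by the dict, ported as insert of the tail.
-- Python's tuple comparison is lexicographic, which is exactly '<' on Lex (String × String) (toLex).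
def pvRoundA (limit : Int) :
    List (String × String) → PySem.Dict (String × String) (List Int) → List Int → Bool →
      PySem.Dict (String × String) (List Int) × List Int × Bool
  | [], b, picked, progress => (b, picked, progress)
  | key :: ks, b, picked, progress =>
    match PySem.Dict.getD b key [] with
    | [] => pvRoundA limit ks b picked progress
    | r :: rs =>
      let picked' := picked ++ [r]
      let b' := PySem.Dict.insert b key rs
      if limit ≤ (picked'.length : Int) then (b', picked', true)
      else pvRoundA limit ks b' picked' true

-- the 'while len(picked) < limit' loop; each progressing pass picks at least one index, so
-- limit.toNat + 1 passes always suffice (fuel only makes the recursion structural, no behaviour change).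
def pvWhileA (limit : Int) :
    Nat → PySem.Dict (String × String) (List Int) → List Int → List Int
  | 0, _, picked => picked
  | fuel+1, b, picked =>
    if (picked.length : Int) < limit then
      match pvRoundA limit (pvSK b) b picked false with
      | (b', picked', true) => pvWhileA limit fuel b' picked'
      | (_, picked', false) => picked'
    else picked

def task_indices_round_robin_py (tasks : List (List (String × String))) (limit : Int) (excluded : List Int) : List Int :=
  if limit ≤ 0 then []
  else pvWhileA limit (limit.toNat + 1) (pvBuckets tasks excluded) []

-- ===== PORT B =====
-- [(pos, key, idx) for key, rows in buckets.items() for pos, idx in enumerate(rows)]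
def pvEntries (b : PySem.Dict (String × String) (List Int)) : List (Int × (String × String) × Int) :=
  (PySem.Dict.items b).flatMap (fun kv => (PySem.List.enumerate kv.2).map (fun pi => (pi.1, kv.1, pi.2)))

-- entries.sort(key=lambda e: (e[0], e[1])): the tuple key (int, (str, str)) compares
-- lexicographically, which is exactly '<' on Lex (Int × Lex (String × String)) (toLex).
def task_indices_round_robin_py_alt (tasks : List (List (String × String))) (limit : Int) (excluded : List Int) : List Int :=
  if limit ≤ 0 then []
  else
    (PySem.List.slice
      (PySem.List.sorted (pvEntries (pvBuckets tasks excluded)) (fun e => toLex (e.1, toLex e.2.1)) false)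
      none (some limit)).map (fun e => e.2.2)

-- ===== PRECONDITION & SPEC =====
def Spec_task_indices_round_robin_py (tasks : List (List (String × String))) (limit : Int) (excluded : List Int) (out : List Int) : Prop := out = task_indices_round_robin_py_alt tasks limit excluded
instance (tasks : List (List (String × String))) (limit : Int) (excluded : List Int) (out : List Int) : Decidable (Spec_task_indices_round_robin_py tasks limit excluded out) := by unfold Spec_task_indices_round_robin_py; infer_instance

-- ===== CLAIM (what is proved, stated in full; the proofs are below) =====
def Claim_equal_task_indices_round_robin_py : Prop := ∀ (tasks : List (List (String × String))) (limit : Int) (excluded : List Int), Dom_task_indices_round_robin_py tasks limit excluded → Spec_task_indices_round_robin_py tasks limit excluded (task_indices_round_robin_py tasks limit excluded)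

-- ===== LEMMAS AND PROOFS =====

-- proof-side abbreviations
def pvKeyOf (e : Int × (String × String) × Int) : Lex (Int × Lex (String × String)) :=
  toLex (e.1, toLex e.2.1)

def pvShift (e : Int × (String × String) × Int) : Int × (String × String) × Int :=
  (e.1 + 1, e.2)

def pvTl (b : PySem.Dict (String × String) (List Int)) : PySem.Dict (String × String) (List Int) :=
  ⟨b.items.map (fun kv => (kv.1, kv.2.tail))⟩

def pvTails (ks : List (String × String)) (b : PySem.Dict (String × String) (List Int)) :
    PySem.Dict (String × String) (List Int) :=
  ⟨b.items.map (fun kv => if kv.1 ∈ ks then (kv.1, kv.2.tail) else kv)⟩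

def pvWidth (b : PySem.Dict (String × String) (List Int)) : Nat :=
  (b.items.map (fun kv => kv.2.length)).foldr max 0

def pvBlock (b : PySem.Dict (String × String) (List Int)) (r : Nat) :
    List (Int × (String × String) × Int) :=
  (pvSK b).filterMap (fun k => (PySem.Dict.getD b k [])[r]?.map (fun i => ((r : Int), k, i)))

def pvRR (b : PySem.Dict (String × String) (List Int)) : List (Int × (String × String) × Int) :=
  (List.range (pvWidth b)).flatMap (pvBlock b)

def pvPicks (ks : List (String × String)) (b : PySem.Dict (String × String) (List Int)) : List Int :=
  ks.filterMap (fun k => (PySem.Dict.getD b k []).head?)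

-- --- generic list facts specific to the shapes in these two programs ---

theorem pv_enum_shift {α : Type} (xs : List α) (s : Int) :
    PySem.List.enumerate xs (s + 1) = (PySem.List.enumerate xs s).map (fun p => (p.1 + 1, p.2)) := by
  induction xs generalizing s with
  | nil => simp [PySem.List.enumerate_nil]
  | cons x xs ih => simp [PySem.List.enumerate_cons, ih]

theorem pv_flatMap_append_perm {α β : Type} (l : List α) (f g : α → List β) :
    (l.flatMap (fun x => f x ++ g x)).Perm (l.flatMap f ++ l.flatMap g) := by
  induction l with
  | nil => simp
  | cons a l ih =>
    simp only [List.flatMap_cons, List.append_assoc]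
    have h2 : (g a ++ (l.flatMap f ++ l.flatMap g)).Perm (l.flatMap f ++ (g a ++ l.flatMap g)) := by
      have := (List.perm_append_comm (l₁ := g a) (l₂ := l.flatMap f)).append
        (List.Perm.refl (l.flatMap g))
      simpa [List.append_assoc] using this
    exact (List.Perm.refl (f a)).append (((List.Perm.refl (g a)).append ih).trans h2)

-- --- dict facts ---

theorem pv_get?_of_mem_items (b : PySem.Dict (String × String) (List Int))
    (hnd : b.keys.Nodup) {kv : (String × String) × List Int} (hm : kv ∈ b.items) :
    b.get? kv.1 = some kv.2 := by
  obtain ⟨items⟩ := b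
  induction items with
  | nil => simp at hm
  | cons p l ih =>
    simp only [PySem.Dict.keys, PySem.Dict.items, List.map_cons, List.nodup_cons, List.mem_map] at hnd
    rcases List.mem_cons.mp hm with h | h
    · subst h
      simp [PySem.Dict.get?, List.find?_cons_of_pos]
    · have hne : p.1 ≠ kv.1 := by
        intro he; exact hnd.1 ⟨kv, h, he.symm⟩
      have := ih (by simpa [PySem.Dict.keys] using hnd.2) h
      simpa [PySem.Dict.get?, List.find?_cons_of_neg, hne] using this

theorem pv_mem_items_of_get? (b : PySem.Dict (String × String) (List Int))
    {k : String × String} {v : List Int} (h : b.get? k = some v) : (k, v) ∈ b.items := by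
  simp only [PySem.Dict.get?, Option.map_eq_some_iff] at h
  obtain ⟨kv, hf, hv⟩ := h
  have hk : kv.1 = k := by simpa using List.find?_some hf
  have := List.mem_of_find?_eq_some hf
  subst hv; rw [← hk]; simpa using this

theorem pv_contains_of_get? (b : PySem.Dict (String × String) (List Int))
    {k : String × String} {v : List Int} (h : b.get? k = some v) : b.contains k = true := by
  have := pv_mem_items_of_get? b h
  simp only [PySem.Dict.contains, List.any_eq_true]
  exact ⟨(k, v), this, by simp⟩

theorem pv_get?_pvTl (b : PySem.Dict (String × String) (List Int)) (k : String × String) :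
    (pvTl b).get? k = (b.get? k).map List.tail := by
  simp only [pvTl, PySem.Dict.get?, PySem.Dict.items, List.find?_map]
  have : ((fun p : (String × String) × List Int => p.1 == k) ∘
      (fun kv : (String × String) × List Int => (kv.1, kv.2.tail))) =
      (fun p : (String × String) × List Int => p.1 == k) := by
    funext kv; rfl
  rw [this]
  cases b.items.find? (fun p => p.1 == k) <;> rfl

theorem pv_getD_pvTl (b : PySem.Dict (String × String) (List Int)) (k : String × String) :
    PySem.Dict.getD (pvTl b) k [] = (PySem.Dict.getD b k []).tail := by
  simp only [PySem.Dict.getD, pv_get?_pvTl]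
  cases b.get? k <;> rfl

theorem pv_keys_pvTl (b : PySem.Dict (String × String) (List Int)) : (pvTl b).keys = b.keys := by
  simp [pvTl, PySem.Dict.keys, List.map_map, Function.comp_def]

theorem pv_sk_pvTl (b : PySem.Dict (String × String) (List Int)) : pvSK (pvTl b) = pvSK b := by
  simp [pvSK, pv_keys_pvTl]

-- --- width facts ---

theorem pv_foldr_max_pred (xs : List Nat) :
    (xs.map (fun n => n - 1)).foldr max 0 = xs.foldr max 0 - 1 := by
  induction xs with
  | nil => simp
  | cons x xs ih => simp [List.foldr_cons, ih]; omega

theorem pv_width_pvTl (b : PySem.Dict (String × String) (List Int)) :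
    pvWidth (pvTl b) = pvWidth b - 1 := by
  simp only [pvWidth, pvTl, PySem.Dict.items, List.map_map]
  have : ((fun kv : (String × String) × List Int => kv.2.length) ∘
      (fun kv : (String × String) × List Int => (kv.1, kv.2.tail))) =
      ((fun n => n - 1) ∘ (fun kv : (String × String) × List Int => kv.2.length)) := by
    funext kv; simp [List.length_tail]
  rw [this, ← List.map_map]
  exact pv_foldr_max_pred _

theorem pv_le_width (b : PySem.Dict (String × String) (List Int))
    {kv : (String × String) × List Int} (hm : kv ∈ b.items) : kv.2.length ≤ pvWidth b := by
  obtain ⟨items⟩ := b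
  induction items with
  | nil => simp at hm
  | cons p l ih =>
    simp only [PySem.Dict.items] at hm ih ⊢
    rcases List.mem_cons.mp hm with h | h
    · subst h; simp [pvWidth, PySem.Dict.items]
    · have := ih h
      simp only [pvWidth, PySem.Dict.items, List.map_cons, List.foldr_cons] at this ⊢
      omega

-- --- round-robin table facts ---

theorem pv_block_zero_map (b : PySem.Dict (String × String) (List Int)) :
    (pvBlock b 0).map (fun e => e.2.2) = pvPicks (pvSK b) b := by
  simp only [pvBlock, pvPicks, List.map_filterMap]
  apply List.filterMap_congr
  intro k _
  rw [← List.head?_eq_getElem?]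
  cases (PySem.Dict.getD b k []).head? <;> rfl

theorem pv_rr_nil_of_picks_nil (b : PySem.Dict (String × String) (List Int))
    (h : pvPicks (pvSK b) b = []) : pvRR b = [] := by
  have hall : ∀ k ∈ pvSK b, PySem.Dict.getD b k [] = [] := by
    intro k hk
    have := (List.filterMap_eq_nil_iff).mp h k hk
    simpa [List.head?_eq_none_iff] using this
  apply List.flatMap_eq_nil_iff.mpr
  intro r _
  apply List.filterMap_eq_nil_iff.mpr
  intro k hk
  simp [hall k hk]

theorem pv_rr_mem_nonneg (b : PySem.Dict (String × String) (List Int))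
    {e : Int × (String × String) × Int} (hm : e ∈ pvRR b) : 0 ≤ e.1 := by
  simp only [pvRR, List.mem_flatMap, pvBlock, List.mem_filterMap] at hm
  obtain ⟨r, -, k, -, he⟩ := hm
  rcases Option.map_eq_some_iff.mp he with ⟨i, -, hi⟩
  subst hi
  exact Int.natCast_nonneg r

theorem pv_block_succ (b : PySem.Dict (String × String) (List Int)) (r : Nat) :
    pvBlock b (r + 1) = (pvBlock (pvTl b) r).map pvShift := by
  simp only [pvBlock, pv_sk_pvTl, List.map_filterMap]
  apply List.filterMap_congr
  intro k _
  rw [pv_getD_pvTl, List.getElem?_tail]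
  cases (PySem.Dict.getD b k [])[r + 1]? with
  | none => rfl
  | some i => simp [pvShift]

theorem pv_rr_decomp (b : PySem.Dict (String × String) (List Int)) (hw : 0 < pvWidth b) :
    pvRR b = pvBlock b 0 ++ (pvRR (pvTl b)).map pvShift := by
  have h1 : pvWidth b = (pvWidth b - 1) + 1 := (Nat.succ_pred_eq_of_pos hw).symm
  rw [pvRR, h1, List.range_succ_eq_map, List.flatMap_cons]
  congr 1
  rw [List.flatMap_map, pvRR, pv_width_pvTl, List.map_flatMap]
  apply List.flatMap_congr
  intro r _
  exact (pv_block_succ b r)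

-- --- A flat entry table, grouped by bucket (items order): heads block ---

def pvHead (b : PySem.Dict (String × String) (List Int)) : List (Int × (String × String) × Int) :=
  b.items.filterMap (fun kv => kv.2.head?.map (fun i => ((0 : Int), kv.1, i)))

theorem pv_item_decomp (k : String × String) (rows : List Int) :
    (PySem.List.enumerate rows).map (fun pi => (pi.1, k, pi.2)) =
      (rows.head?.map (fun i => ((0 : Int), k, i))).toList ++
      ((PySem.List.enumerate rows.tail).map (fun pi => (pi.1, k, pi.2))).map pvShift := by
  cases rows with
  | nil => simp [PySem.List.enumerate_nil]
  | cons x xs =>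
    simp only [PySem.List.enumerate_cons, List.map_cons, List.tail_cons, Option.map_some,
      Option.toList_some, List.head?_cons, List.singleton_append]
    rw [pv_enum_shift xs 0]
    simp [List.map_map, pvShift, Function.comp_def]

theorem pv_entries_decomp (b : PySem.Dict (String × String) (List Int)) :
    (pvEntries b).Perm (pvHead b ++ (pvEntries (pvTl b)).map pvShift) := by
  have h1 : pvEntries b = b.items.flatMap (fun kv =>
      (kv.2.head?.map (fun i => ((0 : Int), kv.1, i))).toList ++
      ((PySem.List.enumerate kv.2.tail).map (fun pi => (pi.1, kv.1, pi.2))).map pvShift) := by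
    unfold pvEntries
    apply List.flatMap_congr
    intro kv _
    exact pv_item_decomp kv.1 kv.2
  rw [h1]
  refine (pv_flatMap_append_perm _ _ _).trans ?_
  apply List.Perm.append
  · rw [pvHead, List.filterMap_eq_flatMap_toList]
  · rw [← List.map_flatMap]
    have h2 : pvEntries (pvTl b) =
        b.items.flatMap (fun kv => (PySem.List.enumerate kv.2.tail).map (fun pi => (pi.1, kv.1, pi.2))) := by
      unfold pvEntries pvTl
      rw [List.flatMap_map]
    rw [h2]

theorem pv_head_perm (b : PySem.Dict (String × String) (List Int)) (hnd : b.keys.Nodup) :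
    (pvHead b).Perm (pvBlock b 0) := by
  have h1 : pvHead b = b.keys.filterMap (fun k =>
      (PySem.Dict.getD b k []).head?.map (fun i => ((0 : Int), k, i))) := by
    rw [pvHead, PySem.Dict.items_eq_map_keys b hnd ([] : List Int), List.filterMap_map]
    rfl
  have h2 : pvBlock b 0 = (pvSK b).filterMap (fun k =>
      (PySem.Dict.getD b k []).head?.map (fun i => ((0 : Int), k, i))) := by
    rw [pvBlock]
    apply List.filterMap_congr
    intro k _
    rw [← List.head?_eq_getElem?]
    norm_num
  rw [h1, h2]
  exact List.Perm.filterMap _ (PySem.List.sorted_perm _ _ _).symm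

theorem pv_keys_nodup_pvTl (b : PySem.Dict (String × String) (List Int)) (hnd : b.keys.Nodup) :
    (pvTl b).keys.Nodup := by rw [pv_keys_pvTl]; exact hnd

theorem pv_entries_nil (b : PySem.Dict (String × String) (List Int)) (hw : pvWidth b = 0) :
    pvEntries b = [] := by
  apply List.flatMap_eq_nil_iff.mpr
  intro kv hm
  have := pv_le_width b hm
  rw [hw] at this
  have : kv.2 = [] := List.eq_nil_of_length_eq_zero (Nat.le_zero.mp this)
  simp [this, PySem.List.enumerate_nil]

theorem pv_rr_perm (b : PySem.Dict (String × String) (List Int)) (hnd : b.keys.Nodup) :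
    (pvRR b).Perm (pvEntries b) := by
  suffices H : ∀ (w : Nat) (b : PySem.Dict (String × String) (List Int)),
      pvWidth b = w → b.keys.Nodup → (pvRR b).Perm (pvEntries b) from H (pvWidth b) b rfl hnd
  intro w
  induction w with
  | zero =>
    intro b hw _
    rw [pv_entries_nil b hw, pvRR, hw]
    simp
  | succ w ih =>
    intro b hw hnd
    rw [pv_rr_decomp b (by omega)]
    refine List.Perm.trans ?_ (pv_entries_decomp b).symm
    exact ((pv_head_perm b hnd).symm).append
      ((ih (pvTl b) (by rw [pv_width_pvTl, hw]; rfl) (pv_keys_nodup_pvTl b hnd)).map pvShift)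

-- --- strict ordering of the round-robin table under the sort key ---

theorem pv_sk_lt (b : PySem.Dict (String × String) (List Int)) (hnd : b.keys.Nodup) :
    (pvSK b).Pairwise (fun a c => (toLex a : Lex (String × String)) < toLex c) := by
  have hle := PySem.List.sorted_pairwise b.keys (fun k => (toLex k : Lex (String × String)))
  have hnd2 : (pvSK b).Nodup := ((PySem.List.sorted_perm _ _ _).nodup_iff).mpr hnd
  have hand := List.Pairwise.and (l := pvSK b) hle hnd2
  exact hand.imp (fun {a c} h => lt_of_le_of_ne h.1 (by simpa [toLex_inj] using h.2))

theorem pv_mem_block_zero_fst (b : PySem.Dict (String × String) (List Int))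
    {e : Int × (String × String) × Int} (hm : e ∈ pvBlock b 0) : e.1 = 0 := by
  simp only [pvBlock, List.mem_filterMap] at hm
  obtain ⟨k, -, he⟩ := hm
  rcases Option.map_eq_some_iff.mp he with ⟨i, -, hi⟩
  subst hi; rfl

theorem pv_shift_lt_iff (a e : Int × (String × String) × Int) :
    pvKeyOf (pvShift a) < pvKeyOf (pvShift e) ↔ pvKeyOf a < pvKeyOf e := by
  simp only [pvKeyOf, pvShift, Prod.Lex.lt_iff, ofLex_toLex]
  constructor <;> rintro (h | ⟨h1, h2⟩)
  · exact Or.inl (by omega)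
  · exact Or.inr ⟨by omega, h2⟩
  · exact Or.inl (by omega)
  · exact Or.inr ⟨by omega, h2⟩

theorem pv_rr_pairwise (b : PySem.Dict (String × String) (List Int)) (hnd : b.keys.Nodup) :
    (pvRR b).Pairwise (fun a e => pvKeyOf a < pvKeyOf e) := by
  suffices H : ∀ (w : Nat) (b : PySem.Dict (String × String) (List Int)),
      pvWidth b = w → b.keys.Nodup → (pvRR b).Pairwise (fun a e => pvKeyOf a < pvKeyOf e) from
    H (pvWidth b) b rfl hnd
  intro w
  induction w with
  | zero =>
    intro b hw _
    rw [pvRR, hw]; simp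
  | succ w ih =>
    intro b hw hnd
    rw [pv_rr_decomp b (by omega)]
    rw [List.pairwise_append]
    refine ⟨?_, ?_, ?_⟩
    · -- block 0: strictly increasing keys at round 0
      refine List.Pairwise.filterMap _ ?_ (pv_sk_lt b hnd)
      intro a a' hlt c hc d hd
      rcases Option.map_eq_some_iff.mp hc with ⟨i, -, hi⟩
      rcases Option.map_eq_some_iff.mp hd with ⟨j, -, hj⟩
      subst hi; subst hj
      simp only [pvKeyOf, Prod.Lex.lt_iff, ofLex_toLex]
      right; exact ⟨by trivial, by simpa [Prod.Lex.lt_iff, ofLex_toLex] using hlt⟩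
    · rw [List.pairwise_map]
      have := ih (pvTl b) (by rw [pv_width_pvTl, hw]; rfl) (pv_keys_nodup_pvTl b hnd)
      exact this.imp (fun {a e} h => (pv_shift_lt_iff a e).mpr h)
    · intro a ha e he
      rcases List.mem_map.mp he with ⟨e', he', hef⟩
      have h0 : a.1 = 0 := pv_mem_block_zero_fst b ha
      have h1 : 0 ≤ e'.1 := pv_rr_mem_nonneg (pvTl b) he'
      subst hef
      simp only [pvKeyOf, pvShift, Prod.Lex.lt_iff, ofLex_toLex]
      left; omega

theorem pv_sorted_eq (b : PySem.Dict (String × String) (List Int)) (hnd : b.keys.Nodup) :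
    PySem.List.sorted (pvEntries b) (fun e => toLex (e.1, toLex e.2.1)) false = pvRR b := by
  refine PySem.List.sorted_eq_of_perm_of_pairwise_lt _ _ _ (pv_rr_perm b hnd) ?_
  exact (pv_rr_pairwise b hnd).imp (fun {a e} h => by simpa [pvKeyOf] using h)

-- --- the destructive inner loop of A, characterised ---

theorem pv_get?_of_getD_cons (b : PySem.Dict (String × String) (List Int)) (k : String × String)
    {r : Int} {rs : List Int} (h : PySem.Dict.getD b k [] = r :: rs) : b.get? k = some (r :: rs) := by
  unfold PySem.Dict.getD at h
  cases hg : b.get? k with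
  | none => rw [hg] at h; simp at h
  | some v => rw [hg] at h; simp at h; rw [h]

theorem pv_getD_insert_of_ne (b : PySem.Dict (String × String) (List Int))
    {k k' : String × String} (v : List Int) (h : k' ≠ k) :
    PySem.Dict.getD (b.insert k v) k' [] = PySem.Dict.getD b k' [] := by
  simp [PySem.Dict.getD, PySem.Dict.get?_insert_of_ne b v h]

theorem pv_picks_insert (ks : List (String × String)) (b : PySem.Dict (String × String) (List Int))
    {k : String × String} (rs : List Int) (hk : k ∉ ks) :
    pvPicks ks (b.insert k rs) = pvPicks ks b := by
  apply List.filterMap_congr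
  intro k' hk'
  have hne : k' ≠ k := fun e => hk (e ▸ hk')
  rw [pv_getD_insert_of_ne b rs hne]

theorem pv_keys_insert_of_get? (b : PySem.Dict (String × String) (List Int))
    {k : String × String} {v w : List Int} (h : b.get? k = some v) :
    (b.insert k w).keys = b.keys := by
  have hc := pv_contains_of_get? b h
  simp only [PySem.Dict.insert, hc, if_true, PySem.Dict.keys, PySem.Dict.items, List.map_map]
  apply List.map_congr_left
  intro kv _
  by_cases hk : kv.1 == k
  · simp only [Function.comp_def, hk, if_true]
    simpa using (beq_iff_eq.mp hk).symm
  · have hne : kv.1 ≠ k := by simpa using hk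
    simp [Function.comp_def, hne]

theorem pv_tails_nil (b : PySem.Dict (String × String) (List Int)) : pvTails [] b = b := by
  obtain ⟨items⟩ := b
  simp [pvTails]

theorem pv_tails_cons_of_empty (b : PySem.Dict (String × String) (List Int))
    {k : String × String} (hnd : b.keys.Nodup) (h : PySem.Dict.getD b k [] = [])
    (ks : List (String × String)) : pvTails (k :: ks) b = pvTails ks b := by
  unfold pvTails
  congr 1
  apply List.map_congr_left
  intro kv hm
  by_cases hk : kv.1 = k
  · have hg := pv_get?_of_mem_items b hnd hm
    rw [hk] at hg
    have hv : kv.2 = [] := by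
      rw [PySem.Dict.getD, hg] at h
      simpa using h
    obtain ⟨k1, v1⟩ := kv
    simp only at hk hv
    subst hk; subst hv
    simp
  · simp [List.mem_cons, hk]

theorem pv_tails_insert (b : PySem.Dict (String × String) (List Int))
    {k : String × String} {r : Int} {rs : List Int} (hnd : b.keys.Nodup)
    (hget : b.get? k = some (r :: rs)) {ks : List (String × String)} (hk : k ∉ ks) :
    pvTails ks (b.insert k rs) = pvTails (k :: ks) b := by
  have hc := pv_contains_of_get? b hget
  unfold pvTails
  congr 1
  simp only [PySem.Dict.insert, hc, if_true, PySem.Dict.items, List.map_map]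
  apply List.map_congr_left
  intro kv hm
  by_cases hkv : kv.1 = k
  · have hg := pv_get?_of_mem_items b hnd hm
    rw [hkv] at hg
    have hv : kv.2 = r :: rs := by
      rw [hget] at hg; exact (Option.some_inj.mp hg).symm
    obtain ⟨k1, v1⟩ := kv
    simp only at hkv hv
    subst hkv; subst hv
    simp [Function.comp_def, hk]
  · have hbeq : (kv.1 == k) = false := beq_eq_false_iff_ne.mpr hkv
    simp [Function.comp_def, hbeq, List.mem_cons, hkv]

theorem pv_tails_sk (b : PySem.Dict (String × String) (List Int)) :
    pvTails (pvSK b) b = pvTl b := by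
  unfold pvTails pvTl
  congr 1
  apply List.map_congr_left
  intro kv hm
  have : kv.1 ∈ pvSK b := by
    rw [pvSK, PySem.List.mem_sorted]
    exact List.mem_map.mpr ⟨kv, hm, rfl⟩
  simp [this]

theorem pv_roundA_no_break (limit : Int) :
    ∀ (ks : List (String × String)) (b : PySem.Dict (String × String) (List Int))
      (picked : List Int) (prog : Bool), ks.Nodup → b.keys.Nodup →
      ((picked.length : Int) + (pvPicks ks b).length < limit) →
      pvRoundA limit ks b picked prog =
        (pvTails ks b, picked ++ pvPicks ks b, prog || !(pvPicks ks b).isEmpty) := by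
  intro ks
  induction ks with
  | nil =>
    intro b picked prog _ _ _
    simp [pvRoundA, pvPicks, pv_tails_nil]
  | cons k ks ih =>
    intro b picked prog hnk hnd hlt
    obtain ⟨hkni, hnk'⟩ := List.nodup_cons.mp hnk
    cases hrows : PySem.Dict.getD b k [] with
    | nil =>
      have hp : pvPicks (k :: ks) b = pvPicks ks b := by simp [pvPicks, hrows]
      rw [hp] at hlt ⊢
      simp only [pvRoundA, hrows]
      rw [ih b picked prog hnk' hnd hlt, pv_tails_cons_of_empty b hnd hrows ks]
    | cons r rs =>
      have hget := pv_get?_of_getD_cons b k hrows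
      have hpk : pvPicks (k :: ks) b = r :: pvPicks ks b := by simp [pvPicks, hrows]
      rw [hpk] at hlt ⊢
      simp only [pvRoundA, hrows]
      have hno : ¬ (limit ≤ ((picked ++ [r]).length : Int)) := by
        simp only [List.length_append, List.length_cons, List.length_nil] at hlt ⊢
        push_cast at hlt ⊢
        omega
      rw [if_neg hno]
      have hkeys : (b.insert k rs).keys = b.keys := pv_keys_insert_of_get? b hget
      have hlt' : ((picked ++ [r]).length : Int) + (pvPicks ks (b.insert k rs)).length < limit := by
        rw [pv_picks_insert ks b rs hkni]
        simp only [List.length_append, List.length_cons, List.length_nil] at hlt ⊢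
        push_cast at hlt ⊢
        omega
      rw [ih (b.insert k rs) (picked ++ [r]) true hnk' (hkeys ▸ hnd) hlt']
      rw [pv_picks_insert ks b rs hkni, pv_tails_insert b hnd hget hkni]
      simp [List.append_assoc]

theorem pv_roundA_break (limit : Int) :
    ∀ (ks : List (String × String)) (b : PySem.Dict (String × String) (List Int))
      (picked : List Int) (prog : Bool), ks.Nodup → b.keys.Nodup →
      ((picked.length : Int) < limit) →
      (limit ≤ (picked.length : Int) + (pvPicks ks b).length) →
      (pvRoundA limit ks b picked prog).2 =
        (picked ++ (pvPicks ks b).take (limit - (picked.length : Int)).toNat, true) := by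
  intro ks
  induction ks with
  | nil =>
    intro b picked prog _ _ hlt hge
    simp only [pvPicks, List.filterMap_nil, List.length_nil] at hge
    omega
  | cons k ks ih =>
    intro b picked prog hnk hnd hlt hge
    obtain ⟨hkni, hnk'⟩ := List.nodup_cons.mp hnk
    cases hrows : PySem.Dict.getD b k [] with
    | nil =>
      have hp : pvPicks (k :: ks) b = pvPicks ks b := by simp [pvPicks, hrows]
      rw [hp] at hge ⊢
      simp only [pvRoundA, hrows]
      exact ih b picked prog hnk' hnd hlt hge
    | cons r rs =>
      have hget := pv_get?_of_getD_cons b k hrows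
      have hpk : pvPicks (k :: ks) b = r :: pvPicks ks b := by simp [pvPicks, hrows]
      rw [hpk] at hge ⊢
      simp only [pvRoundA, hrows]
      by_cases hstop : limit ≤ ((picked ++ [r]).length : Int)
      · rw [if_pos hstop]
        have hc1 : (limit - (picked.length : Int)).toNat = 1 := by
          simp only [List.length_append, List.length_cons, List.length_nil] at hstop
          push_cast at hstop
          omega
        simp [hc1]
      · rw [if_neg hstop]
        have hkeys : (b.insert k rs).keys = b.keys := pv_keys_insert_of_get? b hget
        have hlt' : ((picked ++ [r]).length : Int) < limit := by
          simpa using lt_of_not_ge hstop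
        have hge' : limit ≤ ((picked ++ [r]).length : Int) + (pvPicks ks (b.insert k rs)).length := by
          rw [pv_picks_insert ks b rs hkni]
          simp only [List.length_append, List.length_cons] at hge ⊢
          push_cast at hge ⊢
          omega
        rw [ih (b.insert k rs) (picked ++ [r]) true hnk' (hkeys ▸ hnd) hlt' hge']
        rw [pv_picks_insert ks b rs hkni]
        have hc : (limit - (picked.length : Int)).toNat =
            (limit - (((picked ++ [r]).length : Nat) : Int)).toNat + 1 := by
          simp only [List.length_append, List.length_cons, List.length_nil]
          push_cast
          push_cast at hstop
          omega
        rw [hc, List.take_succ_cons]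
        simp [List.append_assoc]

theorem pv_width_pos_of_picks (b : PySem.Dict (String × String) (List Int))
    (hp : pvPicks (pvSK b) b ≠ []) : 0 < pvWidth b := by
  have : ¬ ∀ k ∈ pvSK b, (fun k => (PySem.Dict.getD b k []).head?) k = none := by
    intro hall
    exact hp (List.filterMap_eq_nil_iff.mpr hall)
  push_neg at this
  obtain ⟨k, -, hk⟩ := this
  cases hrows : PySem.Dict.getD b k [] with
  | nil => rw [hrows] at hk; simp at hk
  | cons r rs =>
    have hget := pv_get?_of_getD_cons b k hrows
    have hm := pv_mem_items_of_get? b hget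
    have := pv_le_width b hm
    simp only [List.length_cons] at this
    omega

theorem pv_whileA_done (limit : Int) (picked : List Int) (h : limit ≤ (picked.length : Int)) :
    ∀ (fuel : Nat) (b : PySem.Dict (String × String) (List Int)),
      pvWhileA limit fuel b picked = picked := by
  intro fuel b
  cases fuel with
  | zero => rfl
  | succ fuel => simp only [pvWhileA]; rw [if_neg (by omega)]

theorem pv_whileA_eq (limit : Int) :
    ∀ (fuel : Nat) (b : PySem.Dict (String × String) (List Int)) (picked : List Int),
      b.keys.Nodup → (limit - (picked.length : Int)).toNat ≤ fuel →
      pvWhileA limit fuel b picked =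
        picked ++ ((pvRR b).map (fun e => e.2.2)).take (limit - (picked.length : Int)).toNat := by
  intro fuel
  induction fuel with
  | zero =>
    intro b picked _ hf
    have h0 : (limit - (picked.length : Int)).toNat = 0 := by omega
    simp [pvWhileA, h0]
  | succ fuel ih =>
    intro b picked hnd hf
    by_cases hlt : (picked.length : Int) < limit
    · have hks : (pvSK b).Nodup := ((PySem.List.sorted_perm _ _ _).nodup_iff).mpr hnd
      by_cases hp : pvPicks (pvSK b) b = []
      · have h0 := pv_roundA_no_break limit (pvSK b) b picked false hks hnd
          (by rw [hp]; simpa using hlt)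
        simp only [pvWhileA]
        rw [if_pos hlt, h0, hp]
        rw [pv_rr_nil_of_picks_nil b hp]
        simp
      · have hw := pv_width_pos_of_picks b hp
        have hmap : (pvRR b).map (fun e => e.2.2) =
            pvPicks (pvSK b) b ++ (pvRR (pvTl b)).map (fun e => e.2.2) := by
          rw [pv_rr_decomp b hw, List.map_append, pv_block_zero_map, List.map_map]
          rfl
        have hLpos : 0 < (pvPicks (pvSK b) b).length := List.length_pos_iff.mpr hp
        by_cases hbr : (picked.length : Int) + (pvPicks (pvSK b) b).length < limit
        · have h0 := pv_roundA_no_break limit (pvSK b) b picked false hks hnd hbr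
          have hprog : (false || !(pvPicks (pvSK b) b).isEmpty) = true := by
            simp [List.isEmpty_iff, hp]
          simp only [pvWhileA]
          rw [if_pos hlt, h0, hprog, pv_tails_sk b]
          show pvWhileA limit fuel (pvTl b) (picked ++ pvPicks (pvSK b) b) = _
          rw [ih (pvTl b) (picked ++ pvPicks (pvSK b) b) (pv_keys_nodup_pvTl b hnd)
            (by simp only [List.length_append]; push_cast; omega)]
          rw [hmap, List.append_assoc]
          congr 1
          rw [List.take_append,
            List.take_of_length_le (l := pvPicks (pvSK b) b)
              (i := (limit - (picked.length : Int)).toNat) (by push_cast; omega)]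
          congr 2
          simp only [List.length_append]
          push_cast
          omega
        · have h0 := pv_roundA_break limit (pvSK b) b picked false hks hnd hlt (by omega)
          simp only [pvWhileA]
          rw [if_pos hlt]
          rcases hmatch : pvRoundA limit (pvSK b) b picked false with ⟨b1, p1, prg⟩
          rw [hmatch] at h0
          simp only [Prod.mk.injEq] at h0
          obtain ⟨hp1, hprg⟩ := h0
          subst hprg; subst hp1
          have hcle : (limit - (picked.length : Int)).toNat ≤ (pvPicks (pvSK b) b).length := by
            omega
          have hdone : limit ≤ (((picked ++
              (pvPicks (pvSK b) b).take (limit - (picked.length : Int)).toNat).length : Nat) : Int) := by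
            simp only [List.length_append, List.length_take]
            push_cast
            omega
          show pvWhileA limit fuel b1
              (picked ++ (pvPicks (pvSK b) b).take (limit - (picked.length : Int)).toNat) = _
          rw [pv_whileA_done limit _ hdone fuel b1]
          rw [hmap, List.take_append, Nat.sub_eq_zero_of_le hcle]
          simp
    · have h0 : (limit - (picked.length : Int)).toNat = 0 := by omega
      simp only [pvWhileA]
      rw [if_neg hlt, h0]
      simp

-- --- the bucket dict has distinct keys ---

theorem pv_buckets_nodup (tasks : List (List (String × String))) (excluded : List Int) :
    (pvBuckets tasks excluded).keys.Nodup := by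
  unfold pvBuckets
  suffices H : ∀ (l : List (Int × List (String × String)))
      (d : PySem.Dict (String × String) (List Int)), d.keys.Nodup →
      (l.foldl (fun b p =>
        if excluded.contains p.1 then b
        else PySem.Dict.modify b (pvNorm p.2 "scale", pvNorm p.2 "failure_type") [] (· ++ [p.1])) d).keys.Nodup by
    exact H _ PySem.Dict.empty (by simp [PySem.Dict.empty, PySem.Dict.keys])
  intro l
  induction l with
  | nil => intro d hd; simpa using hd
  | cons p l ih =>
    intro d hd
    simp only [List.foldl_cons]
    by_cases hc : excluded.contains p.1
    · rw [if_pos hc]; exact ih d hd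
    · rw [if_neg hc]
      apply ih
      simpa using PySem.Dict.nodup_keys_foldl_modify_key [p]
        (fun q => (pvNorm q.2 "scale", pvNorm q.2 "failure_type")) []
        (fun _ q => (· ++ [q.1])) d hd

-- ===== VERDICT (by name: the statement is the Claim_ definition above) =====
theorem task_indices_round_robin_py_spec : Claim_equal_task_indices_round_robin_py := by
  intro tasks limit excluded _
  unfold Spec_task_indices_round_robin_py task_indices_round_robin_py task_indices_round_robin_py_alt
  by_cases hl : limit ≤ 0
  · rw [if_pos hl, if_pos hl]
  · rw [if_neg hl, if_neg hl]
    have hnd := pv_buckets_nodup tasks excluded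
    rw [pv_whileA_eq limit (limit.toNat + 1) (pvBuckets tasks excluded) [] hnd (by simp)]
    rw [pv_sorted_eq _ hnd, PySem.List.slice_to _ (by omega : (0 : Int) ≤ limit)]
    simp [List.map_take]
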